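-- pv_equiv track=rewrite | github.com/paiml/depyler | examples/hard_db_join_merge.py | merge_join
-- ===== SOURCE A (Python) =====
-- from typing import List, Tuple
--
-- def sort_by_key(table: List[Tuple[int, int]]) -> List[Tuple[int, int]]:
--     result: List[Tuple[int, int]] = []
--     for t in table:
--         result.append(t)
--     n: int = len(result)
--     for i in range(n):
--         for j in range(i + 1, n):
--             if result[j][0] < result[i][0]:
--                 temp: Tuple[int, int] = result[i]
--                 result[i] = result[j]
--                 result[j] = temp
--     return result
--
-- def merge_join(left: List[Tuple[int, int]], right: List[Tuple[int, int]]) -> List[Tuple[int, int, int, int]]: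
--     sl: List[Tuple[int, int]] = sort_by_key(left)
--     sr: List[Tuple[int, int]] = sort_by_key(right)
--     result: List[Tuple[int, int, int, int]] = []
--     i: int = 0
--     j: int = 0
--     while i < len(sl) and j < len(sr):
--         if sl[i][0] < sr[j][0]:
--             i = i + 1
--         elif sl[i][0] > sr[j][0]:
--             j = j + 1
--         else:
--             k: int = j
--             while k < len(sr) and sr[k][0] == sl[i][0]:
--                 result.append((sl[i][0], sl[i][1], sr[k][0], sr[k][1]))
--                 k = k + 1
--             i = i + 1
--     return result
-- ===== SOURCE B (Python) =====
-- from typing import List, Tuple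
--
-- def sort_by_key(table: List[Tuple[int, int]]) -> List[Tuple[int, int]]:
--     result: List[Tuple[int, int]] = []
--     for t in table:
--         result.append(t)
--     n: int = len(result)
--     for i in range(n):
--         for j in range(i + 1, n):
--             if result[j][0] < result[i][0]:
--                 temp: Tuple[int, int] = result[i]
--                 result[i] = result[j]
--                 result[j] = temp
--     return result
--
-- def merge_join(left: List[Tuple[int, int]], right: List[Tuple[int, int]]) -> List[Tuple[int, int, int, int]]:
--     sl = sort_by_key(left)
--     sr = sort_by_key(right)
--     index = {}
--     for r in sr:
--         index[r[0]] = index.get(r[0], []) + [r]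
--     result: List[Tuple[int, int, int, int]] = []
--     for l in sl:
--         for r in index.get(l[0], []):
--             result.append((l[0], l[1], r[0], r[1]))
--     return result
-- ===== Notes on version B (the rewrite author's own statement) =====
-- stated objective: idiomatic
-- what changed: The two-pointer merge phase with its nested index/while scans is replaced by a hash join: one pass builds a dict index key -> rows over the sorted right table, then one pass over the sorted left table emits each key's group via a dict lookup (the quadratic swap sort is kept unchanged so the output order is identical).
import Mathlib
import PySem

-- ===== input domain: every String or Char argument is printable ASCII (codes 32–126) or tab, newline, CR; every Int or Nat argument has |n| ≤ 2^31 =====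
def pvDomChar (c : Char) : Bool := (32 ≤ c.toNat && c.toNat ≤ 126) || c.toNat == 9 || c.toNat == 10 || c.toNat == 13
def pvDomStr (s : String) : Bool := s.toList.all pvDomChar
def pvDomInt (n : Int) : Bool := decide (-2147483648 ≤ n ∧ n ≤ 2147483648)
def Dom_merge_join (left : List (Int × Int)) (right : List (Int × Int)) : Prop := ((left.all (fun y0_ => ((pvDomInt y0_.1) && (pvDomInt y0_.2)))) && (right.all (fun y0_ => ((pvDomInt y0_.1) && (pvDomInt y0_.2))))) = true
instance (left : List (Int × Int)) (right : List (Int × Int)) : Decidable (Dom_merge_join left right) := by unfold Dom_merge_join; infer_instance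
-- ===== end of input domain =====

-- B replaces A's two-pointer merge phase by a dict-indexed hash join over the same sorted tables (same cost class; the quadratic sort is shared).

-- ===== PORT A =====
-- helper sort_by_key, shared verbatim by A and B (both Python files contain the identical function):
-- the copy loop is the first foldl; the nested index loops swap via pyGetD/pySetD (indices produced by range are always in bounds).
def sort_by_key (table : List (Int × Int)) : List (Int × Int) :=
  let result := table.foldl (fun acc t => acc ++ [t]) []
  let n : Int := (result.length : Int)
  (PySem.List.pyRange 0 n 1).foldl (fun res i =>
    (PySem.List.pyRange (i + 1) n 1).foldl (fun res j =>
      if (PySem.List.pyGetD res j (0, 0)).1 < (PySem.List.pyGetD res i (0, 0)).1 then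
        let temp := PySem.List.pyGetD res i (0, 0)
        PySem.List.pySetD (PySem.List.pySetD res i (PySem.List.pyGetD res j (0, 0))) j temp
      else res) res) result

-- inner 'while k < len(sr) and sr[k][0] == sl[i][0]' loop of A (k starts at j ≥ 0 and only increments: Nat index, getD exact in range)
def joinGroup (sl sr : List (Int × Int)) (i k : Nat) (acc : List (Int × Int × Int × Int)) :
    List (Int × Int × Int × Int) :=
  if k < sr.length then
    if (sr.getD k (0, 0)).1 == (sl.getD i (0, 0)).1 then
      joinGroup sl sr i (k + 1)
        (acc ++ [((sl.getD i (0, 0)).1, (sl.getD i (0, 0)).2, (sr.getD k (0, 0)).1, (sr.getD k (0, 0)).2)])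
    else acc
  else acc
termination_by sr.length - k

-- outer 'while i < len(sl) and j < len(sr)' loop of A (i, j start at 0 and only increment: Nat indices)
def mergeLoopA (sl sr : List (Int × Int)) (i j : Nat) (acc : List (Int × Int × Int × Int)) :
    List (Int × Int × Int × Int) :=
  if i < sl.length ∧ j < sr.length then
    if (sl.getD i (0, 0)).1 < (sr.getD j (0, 0)).1 then mergeLoopA sl sr (i + 1) j acc
    else if (sr.getD j (0, 0)).1 < (sl.getD i (0, 0)).1 then mergeLoopA sl sr i (j + 1) acc
    else mergeLoopA sl sr (i + 1) j (joinGroup sl sr i j acc)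
  else acc
termination_by (sl.length - i) + (sr.length - j)

def merge_join (left : List (Int × Int)) (right : List (Int × Int)) : List (Int × Int × Int × Int) :=
  mergeLoopA (sort_by_key left) (sort_by_key right) 0 0 []

-- ===== PORT B =====
def merge_join_alt (left : List (Int × Int)) (right : List (Int × Int)) : List (Int × Int × Int × Int) :=
  let sl := sort_by_key left
  let sr := sort_by_key right
  let index : PySem.Dict Int (List (Int × Int)) :=
    sr.foldl (fun d r => d.modify r.1 [] (fun g => g ++ [r])) PySem.Dict.empty
  sl.foldl (fun acc l =>
    (index.getD l.1 []).foldl (fun acc2 r => acc2 ++ [(l.1, l.2, r.1, r.2)]) acc) []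

-- ===== PRECONDITION & SPEC =====
def Spec_merge_join (left : List (Int × Int)) (right : List (Int × Int)) (out : List (Int × Int × Int × Int)) : Prop := out = merge_join_alt left right
instance (left : List (Int × Int)) (right : List (Int × Int)) (out : List (Int × Int × Int × Int)) : Decidable (Spec_merge_join left right out) := by unfold Spec_merge_join; infer_instance

-- ===== CLAIM (what is proved, stated in full; the proofs are below) =====
def Claim_equal_merge_join : Prop := ∀ (left : List (Int × Int)) (right : List (Int × Int)), Dom_merge_join left right → Spec_merge_join left right (merge_join left right)

-- ===== LEMMAS AND PROOFS =====

-- ---- generic getD/set/drop helpers ----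
theorem pvGetD_set_self {α : Type} [Inhabited α] (l : List α) (i : Nat) (v d : α) (h : i < l.length) :
    (l.set i v).getD i d = v := by
  simp [List.getD_eq_getElem?_getD, List.getElem?_set_self (by omega)]

theorem pvGetD_set_ne {α : Type} (l : List α) (i j : Nat) (v d : α) (h : i ≠ j) :
    (l.set i v).getD j d = l.getD j d := by
  simp [List.getD_eq_getElem?_getD, List.getElem?_set_ne h]

theorem pvGetD_mem_drop {α : Type} (l : List α) (i q : Nat) (d : α) (h1 : i ≤ q) (h2 : q < l.length) :
    l.getD q d ∈ l.drop i := by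
  have hq : q - i < (l.drop i).length := by simp; omega
  have : (l.drop i)[q - i] = l[q] := by
    rw [List.getElem_drop]; congr 1; omega
  rw [List.getD_eq_getElem l d h2, ← this]
  exact List.getElem_mem _

theorem pvMem_drop {α : Type} (l : List α) (i : Nat) (d : α) (x : α) (h : x ∈ l.drop i) :
    ∃ q, i ≤ q ∧ q < l.length ∧ l.getD q d = x := by
  obtain ⟨m, hm, hx⟩ := List.mem_iff_getElem.1 h
  have hm' : i + m < l.length := by simp at hm; omega
  refine ⟨i + m, by omega, hm', ?_⟩
  rw [List.getD_eq_getElem l d hm', ← hx, List.getElem_drop]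

-- ---- the swap step of A's selection-style sort, Nat-indexed ----
def swapStep (i : Nat) (res : List (Int × Int)) (j : Nat) : List (Int × Int) :=
  if (res.getD j (0, 0)).1 < (res.getD i (0, 0)).1 then
    (res.set i (res.getD j (0, 0))).set j (res.getD i (0, 0))
  else res

def innerN (i : Nat) (res : List (Int × Int)) (js : List Nat) : List (Int × Int) :=
  js.foldl (swapStep i) res

theorem swapStep_length (i j : Nat) (res : List (Int × Int)) :
    (swapStep i res j).length = res.length := by
  unfold swapStep; split <;> simp

theorem swapStep_unchanged (i j p : Nat) (res : List (Int × Int)) (h1 : p ≠ i) (h2 : p ≠ j) :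
    (swapStep i res j).getD p (0, 0) = res.getD p (0, 0) := by
  unfold swapStep; split
  · rw [pvGetD_set_ne _ _ _ _ _ (Ne.symm h2), pvGetD_set_ne _ _ _ _ _ (Ne.symm h1)]
  · rfl

theorem swapStep_i_le (i j : Nat) (res : List (Int × Int)) (hij : i < j) (hj : j < res.length) :
    ((swapStep i res j).getD i (0, 0)).1 ≤ ((res.getD i (0, 0))).1 := by
  unfold swapStep; split
  · rename_i h
    rw [pvGetD_set_ne _ _ _ _ _ (by omega), pvGetD_set_self _ _ _ _ (by omega)]
    exact le_of_lt h
  · exact le_refl _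

theorem swapStep_i_le_j (i j : Nat) (res : List (Int × Int)) (hij : i < j) (hj : j < res.length) :
    ((swapStep i res j).getD i (0, 0)).1 ≤ ((swapStep i res j).getD j (0, 0)).1 := by
  unfold swapStep; split
  · rename_i h
    rw [pvGetD_set_ne _ _ _ _ _ (by omega), pvGetD_set_self _ _ _ _ (by omega),
        pvGetD_set_self _ _ _ _ (by simpa using hj)]
    exact le_of_lt h
  · rename_i h; omega

theorem swapStep_drop_mem (i j : Nat) (res : List (Int × Int)) (hij : i < j) (hj : j < res.length) :
    ∀ x ∈ (swapStep i res j).drop i, x ∈ res.drop i := by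
  intro x hx
  obtain ⟨q, hiq, hq, hval⟩ := pvMem_drop _ _ (0, 0) x hx
  rw [swapStep_length] at hq
  by_cases hqi : q = i
  · subst hqi
    unfold swapStep at hval
    split at hval
    · rw [pvGetD_set_ne _ _ _ _ _ (by omega), pvGetD_set_self _ _ _ _ (by omega)] at hval
      rw [← hval]; exact pvGetD_mem_drop _ _ _ _ (by omega) hj
    · rw [← hval]; exact pvGetD_mem_drop _ _ _ _ hiq hq
  · by_cases hqj : q = j
    · subst hqj
      unfold swapStep at hval
      split at hval
      · rw [pvGetD_set_self _ _ _ _ (by simpa using hj)] at hval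
        rw [← hval]; exact pvGetD_mem_drop _ _ _ _ (by omega) (by omega)
      · rw [← hval]; exact pvGetD_mem_drop _ _ _ _ hiq hq
    · rw [swapStep_unchanged _ _ _ _ hqi hqj] at hval
      rw [← hval]; exact pvGetD_mem_drop _ _ _ _ hiq hq

-- ---- one full inner pass ----
theorem innerN_spec (i : Nat) (js : List Nat) :
    ∀ (res : List (Int × Int)), i < res.length → (∀ j ∈ js, i < j ∧ j < res.length) →
    (innerN i res js).length = res.length ∧
    (∀ p, p ≠ i → p ∉ js → (innerN i res js).getD p (0, 0) = res.getD p (0, 0)) ∧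
    ((innerN i res js).getD i (0, 0)).1 ≤ (res.getD i (0, 0)).1 ∧
    (∀ j ∈ js, ((innerN i res js).getD i (0, 0)).1 ≤ ((innerN i res js).getD j (0, 0)).1) ∧
    (∀ x ∈ (innerN i res js).drop i, x ∈ res.drop i) := by
  induction js with
  | nil => intro res hi hjs; simp [innerN]
  | cons j js ih =>
    intro res hi hjs
    have hj := hjs j (by simp)
    have hlen1 : (swapStep i res j).length = res.length := swapStep_length i j res
    have hjs' : ∀ j' ∈ js, i < j' ∧ j' < (swapStep i res j).length := by
      intro j' hj'; rw [hlen1]; exact hjs j' (by simp [hj'])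
    obtain ⟨L, U, Mi, S5, M⟩ := ih (swapStep i res j) (by omega) hjs'
    have hinner : innerN i res (j :: js) = innerN i (swapStep i res j) js := rfl
    rw [hinner]
    refine ⟨by omega, ?_, ?_, ?_, ?_⟩
    · intro p hpi hpjs
      rw [U p hpi (by simp at hpjs; tauto),
          swapStep_unchanged _ _ _ _ hpi (by simp at hpjs; tauto)]
    · exact le_trans Mi (swapStep_i_le i j res hj.1 hj.2)
    · intro j' hj'
      rcases List.mem_cons.1 hj' with h | h
      · subst h
        by_cases hmem : j' ∈ js
        · exact S5 j' hmem
        · rw [U j' (by omega) hmem]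
          exact le_trans Mi (swapStep_i_le_j i j' res hj.1 hj.2)
      · exact S5 _ h
    · intro x hx
      exact swapStep_drop_mem i j res hj.1 hj.2 x (M x hx)

-- ---- outer loop ----
def jsOf (n i : Nat) : List Nat := (List.range (n - (i + 1))).map (fun k => i + 1 + k)

theorem mem_jsOf (n i j : Nat) : j ∈ jsOf n i ↔ i < j ∧ j < n := by
  simp only [jsOf, List.mem_map, List.mem_range]
  constructor
  · rintro ⟨k, hk, rfl⟩; omega
  · rintro ⟨h1, h2⟩; exact ⟨j - (i + 1), by omega, by omega⟩

theorem outer_go (n : Nat) : ∀ (m i : Nat) (res : List (Int × Int)), m = n - i → res.length = n → i ≤ n →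
    (∀ p q, p < i → p < q → q < n → ((res.getD p (0, 0))).1 ≤ ((res.getD q (0, 0))).1) →
    ((List.range' i m).foldl (fun res i => innerN i res (jsOf n i)) res).length = n ∧
    (∀ p q, p < q → q < n →
      (((List.range' i m).foldl (fun res i => innerN i res (jsOf n i)) res).getD p (0, 0)).1 ≤
      (((List.range' i m).foldl (fun res i => innerN i res (jsOf n i)) res).getD q (0, 0)).1) := by
  intro m
  induction m with
  | zero => intro i res hm hlen hi hpre; exact ⟨hlen, fun p q h1 h2 => hpre p q (by omega) h1 h2⟩
  | succ m ih =>
    intro i res hm hlen hi hpre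
    have hin : i < n := by omega
    rw [List.range'_succ]
    have hjs : ∀ j ∈ jsOf n i, i < j ∧ j < res.length := by
      intro j hj; rw [hlen]; exact (mem_jsOf n i j).1 hj
    obtain ⟨L, U, Mi, S5, M⟩ := innerN_spec i (jsOf n i) res (by omega) hjs
    set res1 := innerN i res (jsOf n i) with hres1
    have hpre' : ∀ p q, p < i + 1 → p < q → q < n → ((res1.getD p (0, 0))).1 ≤ ((res1.getD q (0, 0))).1 := by
      intro p q hp hpq hq
      by_cases hpi : p = i
      · subst hpi
        exact S5 q ((mem_jsOf n p q).2 ⟨hpq, hq⟩)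
      · have hp' : p < i := by omega
        have hup : res1.getD p (0, 0) = res.getD p (0, 0) :=
          U p (by omega) (fun hc => by have := (mem_jsOf n i p).1 hc; omega)
        by_cases hqi : q < i
        · have huq : res1.getD q (0, 0) = res.getD q (0, 0) :=
            U q (by omega) (fun hc => by have := (mem_jsOf n i q).1 hc; omega)
          rw [hup, huq]; exact hpre p q hp' hpq hq
        · have hq' : i ≤ q := by omega
          have hmem : res1.getD q (0, 0) ∈ res.drop i :=
            M _ (pvGetD_mem_drop _ _ _ _ hq' (by omega))
          obtain ⟨q', hiq', hq'len, hval⟩ := pvMem_drop _ _ (0, 0) _ hmem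
          rw [hup, ← hval]
          exact hpre p q' hp' (by omega) (by omega)
    exact ih (i + 1) res1 (by omega) (by omega) (by omega) hpre'

-- ---- bridge: the port's Int-indexed sort equals the Nat-indexed form ----
theorem sort_eq_sortN (t : List (Int × Int)) :
    sort_by_key t =
      (List.range t.length).foldl (fun res i => innerN i res (jsOf t.length i)) t := by
  unfold sort_by_key
  simp only [PySem.List.foldl_append_singleton_eq_self, List.nil_append]
  rw [PySem.List.pyRange_one]
  have h0 : (((t.length : Int)) - 0).toNat = t.length := by omega
  rw [h0, List.foldl_map]
  apply PySem.List.foldl_congr_mem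
  intro res k hk
  rw [PySem.List.pyRange_one, List.foldl_map]
  unfold innerN jsOf
  rw [List.foldl_map]
  have hlen2 : (((t.length : Int)) - ((0 + (k : Int)) + 1)).toNat = t.length - (k + 1) := by omega
  rw [hlen2]
  apply PySem.List.foldl_congr_mem
  intro res2 m hm
  unfold swapStep
  have hidx : ((0 + (k : Int)) + 1) + (m : Int) = ((k + 1 + m : Nat) : Int) := by push_cast; ring
  have hidx2 : (0 + (k : Int)) = ((k : Nat) : Int) := by ring
  rw [hidx, hidx2]
  simp only [PySem.List.pyGetD_natCast, PySem.List.pySetD_natCast]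

theorem length_sort_by_key (t : List (Int × Int)) : (sort_by_key t).length = t.length := by
  rw [sort_eq_sortN, List.range_eq_range']
  exact (outer_go t.length t.length 0 t (by omega) rfl (by omega) (by omega)).1

theorem pairwise_sort_by_key (t : List (Int × Int)) :
    (sort_by_key t).Pairwise (fun a b => a.1 ≤ b.1) := by
  have h := (outer_go t.length t.length 0 t (by omega) rfl (by omega) (by omega))
  rw [List.pairwise_iff_getElem]
  intro p q hp hq hpq
  have hl := length_sort_by_key t
  rw [← List.getD_eq_getElem (sort_by_key t) (0, 0) hp, ← List.getD_eq_getElem (sort_by_key t) (0, 0) hq]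
  have := h.2 p q hpq (by omega)
  rw [sort_eq_sortN, List.range_eq_range']
  exact this

-- ---- A's merge phase: list-level recursion ----
def mergeL (sl sr : List (Int × Int)) : List (Int × Int × Int × Int) :=
  match sl, sr with
  | [], _ => []
  | _ :: _, [] => []
  | l :: ls, r :: rs =>
    if l.1 < r.1 then mergeL ls (r :: rs)
    else if r.1 < l.1 then mergeL (l :: ls) rs
    else (((r :: rs).takeWhile (fun x => x.1 == l.1)).map (fun x => (l.1, l.2, x.1, x.2))) ++
         mergeL ls (r :: rs)
termination_by sl.length + sr.length

theorem joinGroup_eq (sl sr : List (Int × Int)) (i : Nat) :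
    ∀ (k : Nat) (acc : List (Int × Int × Int × Int)), k ≤ sr.length →
    joinGroup sl sr i k acc =
      acc ++ ((sr.drop k).takeWhile (fun r => r.1 == (sl.getD i (0, 0)).1)).map
        (fun r => ((sl.getD i (0, 0)).1, (sl.getD i (0, 0)).2, r.1, r.2)) := by
  suffices h : ∀ (n k : Nat) (acc : List (Int × Int × Int × Int)), n = sr.length - k →
      k ≤ sr.length →
      joinGroup sl sr i k acc =
        acc ++ ((sr.drop k).takeWhile (fun r => r.1 == (sl.getD i (0, 0)).1)).map
          (fun r => ((sl.getD i (0, 0)).1, (sl.getD i (0, 0)).2, r.1, r.2)) by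
    intro k acc hk; exact h _ k acc rfl hk
  intro n
  induction n with
  | zero =>
    intro k acc hn hk
    have hke : k = sr.length := by omega
    subst hke
    rw [joinGroup]
    simp
  | succ n ih =>
    intro k acc hn hk
    have hklt : k < sr.length := by omega
    rw [joinGroup, if_pos hklt]
    rw [List.drop_eq_getElem_cons hklt, List.takeWhile_cons,
        ← List.getD_eq_getElem sr (0, 0) hklt]
    split_ifs with hb1
    · rw [ih (k + 1) _ (by omega) (by omega)]
      simp
    · simp

theorem mergeLoopA_eq (sl sr : List (Int × Int)) :
    ∀ (fuel i j : Nat) (acc : List (Int × Int × Int × Int)),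
      fuel = (sl.length - i) + (sr.length - j) → i ≤ sl.length → j ≤ sr.length →
      mergeLoopA sl sr i j acc = acc ++ mergeL (sl.drop i) (sr.drop j) := by
  intro fuel
  induction fuel using Nat.strong_induction_on with
  | _ fuel ih =>
    intro i j acc hfuel hi hj
    by_cases hc : i < sl.length ∧ j < sr.length
    · rw [mergeLoopA, if_pos hc]
      obtain ⟨hil, hjl⟩ := hc
      rw [mergeL.eq_def]
      rw [List.drop_eq_getElem_cons hil, List.drop_eq_getElem_cons hjl,
          ← List.getD_eq_getElem sl (0, 0) hil, ← List.getD_eq_getElem sr (0, 0) hjl]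
      simp only []
      by_cases h1 : (sl.getD i (0, 0)).1 < (sr.getD j (0, 0)).1
      · rw [if_pos h1, if_pos h1,
            ih ((sl.length - (i + 1)) + (sr.length - j)) (by omega) (i + 1) j acc rfl (by omega) hj,
            List.getD_eq_getElem sr (0, 0) hjl, ← List.drop_eq_getElem_cons hjl]
      · rw [if_neg h1, if_neg h1]
        by_cases h2 : (sr.getD j (0, 0)).1 < (sl.getD i (0, 0)).1
        · rw [if_pos h2, if_pos h2,
              ih ((sl.length - i) + (sr.length - (j + 1))) (by omega) i (j + 1) acc rfl hi (by omega),
              List.getD_eq_getElem sl (0, 0) hil, ← List.drop_eq_getElem_cons hil]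
        · rw [if_neg h2, if_neg h2,
              ih ((sl.length - (i + 1)) + (sr.length - j)) (by omega) (i + 1) j _ rfl (by omega) hj,
              joinGroup_eq sl sr i j _ (by omega),
              List.getD_eq_getElem sr (0, 0) hjl, ← List.drop_eq_getElem_cons hjl,
              List.append_assoc]
    · rw [mergeLoopA, if_neg hc]
      rcases Nat.lt_or_ge i sl.length with hil | hil
      · have hje : j = sr.length := by omega
        subst hje
        rw [List.drop_length, List.drop_eq_getElem_cons hil, mergeL]
        simp
      · have hie : sl.drop i = [] := List.drop_eq_nil_of_le (by omega)
        rw [hie, mergeL]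
        simp

-- ---- merge on sorted lists = filter-based join ----
def outRow (l r : Int × Int) : Int × Int × Int × Int := (l.1, l.2, r.1, r.2)

def joinSpec (sl sr : List (Int × Int)) : List (Int × Int × Int × Int) :=
  sl.flatMap (fun l => (sr.filter (fun r => r.1 == l.1)).map (outRow l))

theorem filter_eq_takeWhile_sorted (x : Int) :
    ∀ (l : List (Int × Int)), l.Pairwise (fun a b => a.1 ≤ b.1) → (∀ y ∈ l, x ≤ y.1) →
    l.filter (fun r => r.1 == x) = l.takeWhile (fun r => r.1 == x) := by
  intro l
  induction l with
  | nil => intro _ _; rfl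
  | cons a l ih =>
    intro hp hlow
    rcases List.pairwise_cons.1 hp with ⟨ha, hp'⟩
    by_cases hax : a.1 = x
    · have hb : (a.1 == x) = true := by simp [hax]
      simp only [List.filter_cons, List.takeWhile_cons, hb, if_true]
      rw [ih hp' (fun y hy => hlow y (by simp [hy]))]
    · have hlt : x < a.1 := lt_of_le_of_ne (hlow a (by simp)) (by omega)
      have hfe : l.filter (fun r => r.1 == x) = [] := by
        rw [List.filter_eq_nil_iff]
        intro y hy
        have := ha y hy
        simp only [beq_iff_eq]; omega
      simp [hax, hfe]

theorem mergeL_eq_joinSpec :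
    ∀ (sl sr : List (Int × Int)), sl.Pairwise (fun a b => a.1 ≤ b.1) →
      sr.Pairwise (fun a b => a.1 ≤ b.1) → mergeL sl sr = joinSpec sl sr := by
  intro sl sr
  induction sl, sr using mergeL.induct with
  | case1 sr => intro _ _; simp [mergeL, joinSpec]
  | case2 l ls => intro _ _; simp [mergeL, joinSpec]
  | case3 l ls r rs h1 ih =>
    intro hsl hsr
    rw [mergeL, if_pos h1, ih (List.Pairwise.sublist (List.sublist_cons_self l ls) hsl) hsr]
    have hfe : (r :: rs).filter (fun x => x.1 == l.1) = [] := by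
      rw [List.filter_eq_nil_iff]
      intro y hy
      have : r.1 ≤ y.1 := by
        rcases List.mem_cons.1 hy with h | h
        · subst h; exact le_refl _
        · exact (List.pairwise_cons.1 hsr).1 y h
      simp only [beq_iff_eq]; omega
    simp [joinSpec, hfe]
  | case4 l ls r rs h1 h2 ih =>
    intro hsl hsr
    rw [mergeL, if_neg h1, if_pos h2, ih hsl (List.Pairwise.sublist (List.sublist_cons_self r rs) hsr)]
    unfold joinSpec
    apply List.flatMap_congr
    intro l' hl'
    have hll' : l.1 ≤ l'.1 := by
      rcases List.mem_cons.1 hl' with h | h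
      · subst h; exact le_refl _
      · exact (List.pairwise_cons.1 hsl).1 l' h
    rw [List.filter_cons, if_neg (by simp; omega)]
  | case5 l ls r rs h1 h2 ih =>
    intro hsl hsr
    have heq : r.1 = l.1 := by omega
    rw [mergeL, if_neg h1, if_neg h2, ih (List.Pairwise.sublist (List.sublist_cons_self l ls) hsl) hsr]
    have hlow : ∀ y ∈ r :: rs, l.1 ≤ y.1 := by
      intro y hy
      rcases List.mem_cons.1 hy with h | h
      · subst h; omega
      · have := (List.pairwise_cons.1 hsr).1 y h; omega
    rw [← filter_eq_takeWhile_sorted l.1 (r :: rs) hsr hlow]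
    simp [joinSpec, outRow]

-- ---- B's side: the dict index holds exactly the filtered groups ----
theorem buildIndex_getD (rs : List (Int × Int)) :
    ∀ (d : PySem.Dict Int (List (Int × Int))) (k : Int),
    (rs.foldl (fun d r => d.modify r.1 [] (fun g => g ++ [r])) d).getD k [] =
      d.getD k [] ++ rs.filter (fun r => r.1 == k) := by
  induction rs with
  | nil => intro d k; simp
  | cons r rs ih =>
    intro d k
    simp only [List.foldl_cons, List.filter_cons]
    rw [ih]
    rw [PySem.Dict.getD_modify]
    by_cases hk : k = r.1
    · subst hk; simp
    · simp [hk, Ne.symm hk]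

theorem merge_join_alt_eq (left right : List (Int × Int)) :
    merge_join_alt left right = joinSpec (sort_by_key left) (sort_by_key right) := by
  simp only [merge_join_alt, joinSpec]
  rw [PySem.List.foldl_congr_mem _ _
    (fun acc l =>
      acc ++ (((sort_by_key right).foldl (fun d r => d.modify r.1 [] (fun g => g ++ [r]))
        PySem.Dict.empty).getD l.1 []).map (fun r => (l.1, l.2, r.1, r.2))) _
    (by intro acc l _; rw [PySem.List.foldl_append_singleton_eq_map])]
  rw [PySem.List.foldl_append_eq_flatMap]
  rw [List.nil_append]
  apply List.flatMap_congr
  intro l _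
  rw [buildIndex_getD]
  simp [outRow]

-- ---- assembly ----
theorem merge_join_eq (left right : List (Int × Int)) :
    merge_join left right = joinSpec (sort_by_key left) (sort_by_key right) := by
  unfold merge_join
  rw [mergeLoopA_eq _ _ _ 0 0 [] rfl (by omega) (by omega)]
  simp only [List.drop_zero, List.nil_append]
  exact mergeL_eq_joinSpec _ _ (pairwise_sort_by_key left) (pairwise_sort_by_key right)

-- ===== VERDICT (by name: the statement is the Claim_ definition above) =====
theorem merge_join_spec : Claim_equal_merge_join := by
  intro left right _
  unfold Spec_merge_join
  rw [merge_join_eq, merge_join_alt_eq]
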